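-- pv_equiv track=rewrite | github.com/boostcampaitech8/pro-nlp-mrc-nlp-05 | Text_Grad/textgrad-qa/src/metrics.py | normalize_answer
-- ===== SOURCE A (Python) =====
-- import string
-- import unicodedata
--
-- def normalize_answer(s: str) -> str:
--     """답변 정규화: 소문자 변환, 구두점 제거, 공백 정리"""
--     s = unicodedata.normalize('NFC', s)
--
--     def remove_punc(text):
--         exclude = set(string.punctuation)
--         return ''.join(ch for ch in text if ch not in exclude)
--
--     def white_space_fix(text):
--         return ' '.join(text.split())
--
--     return white_space_fix(remove_punc(s.lower()))
-- ===== SOURCE B (Python) =====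
-- import string
-- import unicodedata
--
-- def normalize_answer(s: str) -> str:
--     """One left-to-right pass: skip punctuation, collapse whitespace via a pending-space flag."""
--     s = unicodedata.normalize('NFC', s)
--     punct = string.punctuation
--     buf = []
--     pending = False
--     for ch in s.lower():
--         if ch in punct:
--             continue
--         if ch.isspace():
--             if buf:
--                 pending = True
--         else:
--             if pending:
--                 buf.append(' ')
--                 pending = False
--             buf.append(ch)
--     return ''.join(buf)
-- ===== Notes on version B (the rewrite author's own statement) =====
-- stated objective: alternative
-- what changed: Replaces A's three-stage pipeline (filter punctuation into a new string, split on whitespace, join with spaces) by a single left-to-right pass that maintains a buffer and a pending-space flag.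
import Mathlib
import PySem

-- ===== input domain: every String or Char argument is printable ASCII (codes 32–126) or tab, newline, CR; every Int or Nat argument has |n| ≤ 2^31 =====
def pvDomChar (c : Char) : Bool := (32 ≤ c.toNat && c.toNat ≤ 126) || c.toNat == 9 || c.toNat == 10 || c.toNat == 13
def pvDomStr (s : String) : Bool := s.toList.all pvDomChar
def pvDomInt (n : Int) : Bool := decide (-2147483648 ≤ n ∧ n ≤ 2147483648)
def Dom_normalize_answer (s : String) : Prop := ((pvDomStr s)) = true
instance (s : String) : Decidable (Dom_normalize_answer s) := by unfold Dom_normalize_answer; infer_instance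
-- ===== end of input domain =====

-- B collapses A's filter/split/join pipeline into one pass with a pending-space flag; same value, same cost.
-- unicodedata.normalize('NFC', s) is the identity on the Dom_ character set (ASCII + tab/newline/CR), so it is not modeled.

-- ===== PORT A =====
-- string.punctuation
def pyPunct : List Char :=
  ['!', '"', '#', '$', '%', '&', '\'', '(', ')', '*', '+', ',', '-', '.', '/',
   ':', ';', '<', '=', '>', '?', '@', '[', '\\', ']', '^', '_', '`', '{', '|', '}', '~']

def normalize_answer (s : String) : String :=
  -- exclude = set(string.punctuation); ''.join(ch for ch in text if ch not in exclude)
  let exclude : PySem.Set Char := PySem.Set.ofList pyPunct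
  let removed : List Char := (PySem.Str.lower s).toList.filter (fun ch => !(exclude.contains ch))
  -- ' '.join(text.split())
  String.ofList (PySem.Chars.join [' '] (PySem.Chars.split₀ removed))

-- ===== PORT B =====
def pvIsPunct (c : Char) : Bool := pyPunct.contains c

-- the single pass: buf is the output so far, pending records a space owed before the next word char
def wsGo : List Char → List Char → Bool → List Char
  | [], buf, _ => buf
  | c :: rest, buf, pending =>
    if pvIsPunct c then wsGo rest buf pending
    else if PySem.Chars.isspace c then wsGo rest buf (if buf.isEmpty then pending else true)
    else wsGo rest (buf ++ (if pending then [' ', c] else [c])) false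

def normalize_answer_alt (s : String) : String :=
  String.ofList (wsGo (PySem.Str.lower s).toList [] false)

-- ===== PRECONDITION & SPEC =====
def Spec_normalize_answer (s : String) (out : String) : Prop := out = normalize_answer_alt s
instance (s : String) (out : String) : Decidable (Spec_normalize_answer s out) := by unfold Spec_normalize_answer; infer_instance

-- ===== CLAIM (what is proved, stated in full; the proofs are below) =====
def Claim_equal_normalize_answer : Prop := ∀ (s : String), Dom_normalize_answer s → Spec_normalize_answer s (normalize_answer s)

-- ===== LEMMAS AND PROOFS =====

-- ' '.join written as the obvious recursion
def joinW : List (List Char) → List Char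
  | [] => []
  | [w] => w
  | w :: ws => w ++ ' ' :: joinW ws

lemma joinW_eq (l : List (List Char)) : joinW l = PySem.Chars.join [' '] l := by
  induction l with
  | nil => simp [joinW, PySem.Chars.join, List.intercalate]
  | cons w ws ih =>
    cases ws with
    | nil => simp [joinW, PySem.Chars.join, List.intercalate]
    | cons v vs =>
      simp [joinW, PySem.Chars.join, List.intercalate] at ih ⊢
      simp [ih]

lemma joinW_append_singleton (l : List (List Char)) (w : List Char) :
    joinW (l ++ [w]) = joinW l ++ (if l = [] then [] else [' ']) ++ w := by
  induction l with
  | nil => simp [joinW]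
  | cons v vs ih =>
    cases vs with
    | nil => simp [joinW]
    | cons u us => simp [joinW] at ih ⊢; simp [ih]

lemma wsGo_filter (cs : List Char) (buf : List Char) (pending : Bool) :
    wsGo cs buf pending = wsGo (cs.filter (fun c => !pvIsPunct c)) buf pending := by
  induction cs generalizing buf pending with
  | nil => rfl
  | cons c rest ih =>
    by_cases hp : pvIsPunct c = true
    · simp [wsGo, hp, List.filter, ih]
    · simp at hp
      by_cases hs : PySem.Chars.isspace c = true <;>
        simp [wsGo, hp, hs, List.filter, ih]

-- the key invariant linking the one-pass state to split₀.go's (cur, acc) state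
lemma wsGo_split_go (cs : List Char) (acc : List (List Char))
    (hnp : ∀ c ∈ cs, pvIsPunct c = false)
    (hacc : ∀ w ∈ acc, w ≠ []) :
    (wsGo cs (joinW acc.reverse) (decide (acc ≠ [])) =
      PySem.Chars.join [' '] (PySem.Chars.split₀.go cs [] acc))
    ∧ ∀ cur, cur ≠ [] →
      wsGo cs (joinW acc.reverse ++ (if acc = [] then [] else [' ']) ++ cur.reverse) false =
        PySem.Chars.join [' '] (PySem.Chars.split₀.go cs cur acc) := by
  induction cs generalizing acc with
  | nil =>
    refine ⟨?_, ?_⟩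
    · simp [wsGo, PySem.Chars.split₀.go, joinW_eq]
    · intro cur hcur
      simp [wsGo, PySem.Chars.split₀.go, List.isEmpty_eq_false_iff.mpr hcur, ← joinW_eq,
        joinW_append_singleton]
  | cons c rest ih =>
    have hc : pvIsPunct c = false := hnp c (List.mem_cons_self ..)
    have hrest : ∀ x ∈ rest, pvIsPunct x = false := fun x hx => hnp x (List.mem_cons_of_mem _ hx)
    have hJ : acc ≠ [] → (joinW acc.reverse).isEmpty = false := by
      intro h
      match acc, h with
      | a :: as, _ =>
        have ha : a ≠ [] := hacc a (List.mem_cons_self ..)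
        rw [List.reverse_cons, joinW_append_singleton]
        simp [List.isEmpty_eq_false_iff, ha]
    refine ⟨?_, ?_⟩
    · by_cases hs : PySem.Chars.isspace c = true
      · -- whitespace while between words: state unchanged on both sides
        by_cases ha : acc = []
        · subst ha
          simpa [wsGo, hc, hs, PySem.Chars.split₀.go, joinW] using (ih [] hrest (by simp)).1
        · simpa [wsGo, hc, hs, PySem.Chars.split₀.go, hJ ha, ha] using (ih acc hrest hacc).1
      · -- word char starts a new word
        have := (ih acc hrest hacc).2 [c] (by simp)
        by_cases ha : acc = [] <;>
          simpa [wsGo, hc, hs, PySem.Chars.split₀.go, ha] using this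
    · intro cur hcur
      by_cases hs : PySem.Chars.isspace c = true
      · -- whitespace flushes the current word
        have hacc' : ∀ w ∈ cur.reverse :: acc, w ≠ [] := by
          intro w hw
          rcases List.mem_cons.mp hw with h | h
          · subst h; simpa using hcur
          · exact hacc w h
        have := (ih (cur.reverse :: acc) hrest hacc').1
        have hrc : cur.reverse ≠ [] := by simpa using hcur
        have hbuf : (joinW acc.reverse ++ (if acc = [] then [] else [' ']) ++ cur.reverse).isEmpty
            = false := by
          simp [List.isEmpty_eq_false_iff, hrc]
        simp only [joinW_append_singleton, List.reverse_cons] at this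
        by_cases ha : acc = [] <;>
          simpa [wsGo, hc, hs, PySem.Chars.split₀.go, hbuf, ha, hcur, joinW,
            List.isEmpty_eq_false_iff.mpr hcur] using this
      · -- word char extends the current word
        have := (ih acc hrest hacc).2 (c :: cur) (by simp)
        simpa [wsGo, hc, hs, PySem.Chars.split₀.go,
          List.isEmpty_eq_false_iff.mpr hcur, List.append_assoc] using this

lemma set_ofList_punct : (PySem.Set.ofList pyPunct : PySem.Set Char) = pyPunct := by decide

-- ===== VERDICT (by name: the statement is the Claim_ definition above) =====
theorem normalize_answer_spec : Claim_equal_normalize_answer := by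
  intro s _
  unfold Spec_normalize_answer normalize_answer normalize_answer_alt
  rw [wsGo_filter]
  have hfp : ∀ c, (!(PySem.Set.ofList pyPunct : PySem.Set Char).contains c) = !pvIsPunct c := by
    intro c; rw [set_ofList_punct]; rfl
  have hfilter :
      (PySem.Str.lower s).toList.filter (fun ch => !(PySem.Set.ofList pyPunct : PySem.Set Char).contains ch)
        = (PySem.Str.lower s).toList.filter (fun c => !pvIsPunct c) := by
    simp only [hfp]
  have key := (wsGo_split_go ((PySem.Str.lower s).toList.filter (fun c => !pvIsPunct c)) []
    (by intro c hc; have := List.of_mem_filter hc; simpa using this) (by simp)).1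
  simp only [List.reverse_nil, joinW] at key
  simp only [hfilter, PySem.Chars.split₀]
  rw [← key]
  simp
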